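-- pv_equiv track=rewrite | github.com/jrodrigopuca/puntos | tools/generate_sprites.py | assemble_spritesheet
-- ===== SOURCE A (Python) =====
-- T = (0, 0, 0, 0)  # Transparent
--
-- def assemble_spritesheet(grids, frame_size):
--     """Combine grids into a horizontal strip"""
--     n = len(grids)
--     width = frame_size * n
--     height = frame_size
--     pixels = [[T] * width for _ in range(height)]
--     for i, grid in enumerate(grids):
--         ox = i * frame_size
--         for y in range(min(frame_size, len(grid))):
--             for x in range(min(frame_size, len(grid[0]))):
--                 pixels[y][ox + x] = grid[y][x]
--     return pixels, width, height
-- ===== SOURCE B (Python) =====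
-- T = (0, 0, 0, 0)  # Transparent
--
-- def assemble_spritesheet(grids, frame_size):
--     """Combine grids into a horizontal strip, built row by row"""
--     n = len(grids)
--     pixels = []
--     for y in range(frame_size):
--         row = []
--         for grid in grids:
--             if y < len(grid):
--                 cb = min(frame_size, len(grid[0]))
--                 for x in range(cb):
--                     row.append(grid[y][x])
--                 row.extend([T] * (frame_size - cb))
--             else:
--                 row.extend([T] * frame_size)
--         pixels.append(row)
--     return pixels, frame_size * n, frame_size
-- ===== Notes on version B (the rewrite author's own statement) =====
-- stated objective: alternative
-- what changed: B builds the spritesheet row by row, concatenating each grid's (padded) row segment, instead of preallocating a 2-D array and scattering cells into it by index assignment.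
import Mathlib
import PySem

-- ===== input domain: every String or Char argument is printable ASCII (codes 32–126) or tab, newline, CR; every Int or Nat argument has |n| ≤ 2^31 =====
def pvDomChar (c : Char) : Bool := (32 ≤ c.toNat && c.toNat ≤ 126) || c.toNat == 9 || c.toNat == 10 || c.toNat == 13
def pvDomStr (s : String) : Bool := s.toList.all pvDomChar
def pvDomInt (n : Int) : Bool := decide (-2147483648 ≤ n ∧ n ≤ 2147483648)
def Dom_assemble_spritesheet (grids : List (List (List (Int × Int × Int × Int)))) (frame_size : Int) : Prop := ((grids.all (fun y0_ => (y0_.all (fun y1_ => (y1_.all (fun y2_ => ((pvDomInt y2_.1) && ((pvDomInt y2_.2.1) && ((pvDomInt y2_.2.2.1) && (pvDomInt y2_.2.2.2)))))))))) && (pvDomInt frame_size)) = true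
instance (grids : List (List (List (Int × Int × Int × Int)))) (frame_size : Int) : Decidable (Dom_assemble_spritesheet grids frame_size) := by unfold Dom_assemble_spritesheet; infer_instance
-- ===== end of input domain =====

-- B builds the output row by row (concatenation of per-grid segments) instead of A's
-- preallocate-and-scatter by index assignment; same asymptotic cost (objective: alternative).

-- ===== PORT A =====
def pvT : Int × Int × Int × Int := (0, 0, 0, 0)

def assemble_spritesheet (grids : List (List (List (Int × Int × Int × Int)))) (frame_size : Int) : (List (List (Int × Int × Int × Int))) × Int × Int :=
  let n : Int := grids.length
  let width : Int := frame_size * n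
  let height : Int := frame_size
  let pixels0 := (List.range height.toNat).map (fun _ => List.replicate width.toNat pvT)
  let pixels := (PySem.List.enumerate grids 0).foldl (fun px ig =>
    let i := ig.1
    let grid := ig.2
    let ox : Int := i * frame_size
    (List.range (min frame_size (grid.length : Int)).toNat).foldl (fun px y =>
      (List.range (min frame_size ((grid.headD []).length : Int)).toNat).foldl (fun px x =>
        px.set y ((px.getD y []).set (ox.toNat + x) ((grid.getD y []).getD x pvT))) px) px) pixels0
  (pixels, width, height)

-- ===== PORT B =====
def assemble_spritesheet_alt (grids : List (List (List (Int × Int × Int × Int)))) (frame_size : Int) : (List (List (Int × Int × Int × Int))) × Int × Int :=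
  let n : Int := grids.length
  let pixels := (List.range frame_size.toNat).map (fun (y : Nat) =>
    grids.foldl (fun row grid =>
      if (y : Int) < (grid.length : Int) then
        let cb : Int := min frame_size ((grid.headD []).length : Int)
        (row ++ (List.range cb.toNat).map (fun x => (grid.getD y []).getD x pvT))
          ++ List.replicate (frame_size - cb).toNat pvT
      else
        row ++ List.replicate frame_size.toNat pvT) [])
  (pixels, frame_size * n, frame_size)

-- ===== PRECONDITION & SPEC =====
-- Pre_ excludes exactly the inputs on which A raises IndexError: frame_size > 0 and some
-- grid has a row (within the copied region) shorter than min(frame_size, len(grid[0])).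
def Pre_assemble_spritesheet (grids : List (List (List (Int × Int × Int × Int)))) (frame_size : Int) : Prop :=
  frame_size ≤ 0 ∨ ∀ g ∈ grids, ∀ y < (min frame_size (g.length : Int)).toNat,
    min frame_size ((g.headD []).length : Int) ≤ ((g.getD y []).length : Int)
instance (grids : List (List (List (Int × Int × Int × Int)))) (frame_size : Int) : Decidable (Pre_assemble_spritesheet grids frame_size) := by unfold Pre_assemble_spritesheet; infer_instance

def pvWitness_assemble_spritesheet : (List (List (List (Int × Int × Int × Int)))) × Int :=
  ([[[(1, 2, 3, 4)]]], 1)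

def Spec_assemble_spritesheet (grids : List (List (List (Int × Int × Int × Int)))) (frame_size : Int) (out : (List (List (Int × Int × Int × Int))) × Int × Int) : Prop := out = assemble_spritesheet_alt grids frame_size
instance (grids : List (List (List (Int × Int × Int × Int)))) (frame_size : Int) (out : (List (List (Int × Int × Int × Int))) × Int × Int) : Decidable (Spec_assemble_spritesheet grids frame_size out) := by unfold Spec_assemble_spritesheet; infer_instance

-- ===== CLAIM (what is proved, stated in full; the proofs are below) =====
def Claim_equal_assemble_spritesheet : Prop := ∀ (grids : List (List (List (Int × Int × Int × Int)))) (frame_size : Int), Dom_assemble_spritesheet grids frame_size → Pre_assemble_spritesheet grids frame_size → Spec_assemble_spritesheet grids frame_size (assemble_spritesheet grids frame_size)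


-- ===== LEMMAS AND PROOFS =====

-- The row segment a single grid contributes for output row y (B's view of one grid).
def pvBlk (fs : Int) (g : List (List (Int × Int × Int × Int))) (y : Nat) : List (Int × Int × Int × Int) :=
  if (y : Int) < (g.length : Int) then
    (List.range (min fs ((g.headD []).length : Int)).toNat).map (fun x => (g.getD y []).getD x pvT)
      ++ List.replicate (fs - min fs ((g.headD []).length : Int)).toNat pvT
  else List.replicate fs.toNat pvT

theorem pvBlk_length (fs : Int) (g : List (List (Int × Int × Int × Int))) (y : Nat) :
    (pvBlk fs g y).length = fs.toNat := by
  unfold pvBlk; split <;> simp <;> omega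

theorem pv_width (fs : Int) (m : Nat) : (fs * (m : Int)).toNat = m * fs.toNat := by
  rcases lt_or_ge fs 0 with h | h
  · have h1 : fs * (m : Int) ≤ 0 := by
      have h2 : (0 : Int) ≤ (m : Int) := by positivity
      nlinarith
    have h3 : fs.toNat = 0 := by omega
    rw [h3, Nat.mul_zero, Int.toNat_of_nonpos h1]
  · have hfs : (fs.toNat : Int) = fs := Int.toNat_of_nonneg h
    have h4 : fs * (m : Int) = ((m * fs.toNat : Nat) : Int) := by push_cast; rw [hfs]; ring
    rw [h4, Int.toNat_natCast]

theorem pv_rowfold {α : Type} (h : Nat → α) :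
    ∀ (cb : Nat) (start : Nat) (r : List α), start + cb ≤ r.length →
    (List.range cb).foldl (fun r x => r.set (start + x) (h x)) r
      = r.take start ++ (List.range cb).map h ++ r.drop (start + cb) := by
  intro cb
  induction cb with
  | zero => intro start r hr; simp
  | succ cb ih =>
      intro start r hr
      rw [List.range_succ, List.foldl_append, ih start r (by omega)]
      simp only [List.foldl_cons, List.foldl_nil]
      apply List.ext_getElem
      · simp; omega
      · intro i h1 h2
        simp only [List.getElem_set, List.getElem_append, List.length_append,
          List.length_take, List.length_map, List.length_range,
          List.getElem_take, List.getElem_map, List.getElem_range, List.getElem_drop,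
          List.map_append, List.map_cons, List.map_nil, List.getElem_cons,
          List.length_cons, List.length_nil]
        split_ifs <;> (try omega) <;> (try rfl) <;> (try (congr 1; omega))

theorem pv_hoist {α : Type} (p : Nat → Nat) (v : Nat → α) :
    ∀ (cb : Nat) (y : Nat) (px : List (List α)), y < px.length →
    (List.range cb).foldl (fun px x => px.set y ((px.getD y []).set (p x) (v x))) px
      = px.set y ((List.range cb).foldl (fun r x => r.set (p x) (v x)) (px.getD y [])) := by
  intro cb
  induction cb with
  | zero =>
      intro y px hy
      simp only [List.range_zero, List.foldl_nil]
      rw [List.getD_eq_getElem _ _ hy, List.set_getElem_self]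
  | succ cb ih =>
      intro y px hy
      rw [List.range_succ, List.foldl_append, List.foldl_append, ih y px hy]
      simp only [List.foldl_cons, List.foldl_nil]
      rw [List.getD_eq_getElem _ _ (show y < (px.set y _).length by simpa using hy)]
      simp [List.getElem_set_self, List.set_set]

theorem pv_setmap {α : Type} (F i : Nat) (f : Nat → α) (v : α) (hi : i < F) :
    ((List.range F).map f).set i v = (List.range F).map (fun y => if y = i then v else f y) := by
  apply List.ext_getElem
  · simp
  · intro j h1 h2
    simp only [List.getElem_set, List.getElem_map, List.getElem_range]
    split_ifs <;> (try rfl) <;> omega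

theorem pv_yloop {α : Type} (b : List (List α) → Nat → List (List α)) (u : Nat → List α → List α)
    (hb : ∀ px y, y < px.length → b px y = px.set y (u y (px.getD y []))) :
    ∀ (my F : Nat) (f : Nat → List α), my ≤ F →
    (List.range my).foldl b ((List.range F).map f)
      = (List.range F).map (fun y => if y < my then u y (f y) else f y) := by
  intro my
  induction my with
  | zero => simp
  | succ my ih =>
      intro F f hmy
      rw [List.range_succ, List.foldl_append, ih F f (by omega)]
      simp only [List.foldl_cons, List.foldl_nil]
      rw [hb _ my (by simp; omega)]
      rw [PySem.List.getD_map_range _ _ _ _ (by omega)]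
      rw [pv_setmap _ _ _ _ (by omega)]
      apply List.map_congr_left
      intro y hy
      simp only [List.mem_range] at hy
      by_cases h1 : y = my
      · subst h1; simp
      · by_cases h2 : y < my <;> simp [h1, h2] <;> omega

-- One grid's double loop of A transforms every row y by appending that grid's block.
theorem pvA_step (fs : Int) (j : Nat) (g : List (List (Int × Int × Int × Int)))
    (pre : Nat → List (Int × Int × Int × Int)) (m : Nat)
    (hpre : ∀ y, (pre y).length = j * fs.toNat) :
    (List.range (min fs (g.length : Int)).toNat).foldl (fun px y =>
      (List.range (min fs ((g.headD []).length : Int)).toNat).foldl (fun px x =>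
        px.set y ((px.getD y []).set (((j : Int) * fs).toNat + x) ((g.getD y []).getD x pvT))) px)
      ((List.range fs.toNat).map (fun y => pre y ++ List.replicate ((m + 1) * fs.toNat) pvT))
    = (List.range fs.toNat).map (fun y => (pre y ++ pvBlk fs g y) ++ List.replicate (m * fs.toNat) pvT) := by
  rw [pv_yloop _
    (fun y r => (List.range (min fs ((g.headD []).length : Int)).toNat).foldl
      (fun r x => r.set (((j : Int) * fs).toNat + x) ((g.getD y []).getD x pvT)) r)
    (fun px y hy => pv_hoist _ _ _ y px hy) _ _ _ (by omega)]
  apply List.map_congr_left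
  intro y hyF
  simp only [List.mem_range] at hyF
  by_cases hy : y < (min fs (g.length : Int)).toNat
  · rw [if_pos hy]
    have hfs0 : (0 : Int) < fs := by omega
    have hfs : (fs.toNat : Int) = fs := Int.toNat_of_nonneg (by omega)
    have hox : ((j : Int) * fs).toNat = j * fs.toNat := by
      rw [mul_comm]; exact pv_width fs j
    have hcb : (min fs ((g.headD []).length : Int)).toNat ≤ fs.toNat := by omega
    have hmul : (m + 1) * fs.toNat = fs.toNat + m * fs.toNat := by ring
    have hlen : ((j : Int) * fs).toNat + (min fs ((g.headD []).length : Int)).toNat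
        ≤ (pre y ++ List.replicate ((m + 1) * fs.toNat) pvT).length := by
      rw [List.length_append, List.length_replicate, hpre y, hox]; omega
    rw [pv_rowfold _ _ _ _ hlen]
    rw [hox]
    have htake : (pre y ++ List.replicate ((m + 1) * fs.toNat) pvT).take (j * fs.toNat)
        = pre y := List.take_left' (hpre y)
    have hdrop : (pre y ++ List.replicate ((m + 1) * fs.toNat) pvT).drop
        (j * fs.toNat + (min fs ((g.headD []).length : Int)).toNat)
        = List.replicate ((m + 1) * fs.toNat - (min fs ((g.headD []).length : Int)).toNat) pvT := by
      rw [← hpre y, List.drop_length_add_append, List.drop_replicate]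
    rw [htake, hdrop]
    unfold pvBlk
    rw [if_pos (show (y : Int) < (g.length : Int) by omega)]
    have hpad : (fs - min fs ((g.headD []).length : Int)).toNat
        = fs.toNat - (min fs ((g.headD []).length : Int)).toNat := by omega
    rw [hpad]
    simp only [List.append_assoc]
    congr 1
    congr 1
    rw [← List.replicate_add]
    congr 1
    omega
  · rw [if_neg hy]
    unfold pvBlk
    rw [if_neg (show ¬ ((y : Int) < (g.length : Int)) by omega)]
    have hmul : (m + 1) * fs.toNat = fs.toNat + m * fs.toNat := by ring
    rw [List.append_assoc, ← List.replicate_add, ← hmul]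

-- A's fold over the enumerated grids, with an arbitrary already-built prefix in every row.
theorem pvA_fold (fs : Int) :
    ∀ (gs : List (List (List (Int × Int × Int × Int)))) (j : Nat)
      (pre : Nat → List (Int × Int × Int × Int)),
    (∀ y, (pre y).length = j * fs.toNat) →
    (PySem.List.enumerate gs (j : Int)).foldl (fun px ig =>
      (List.range (min fs (ig.2.length : Int)).toNat).foldl (fun px y =>
        (List.range (min fs ((ig.2.headD []).length : Int)).toNat).foldl (fun px x =>
          px.set y ((px.getD y []).set ((ig.1 * fs).toNat + x) ((ig.2.getD y []).getD x pvT))) px) px)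
      ((List.range fs.toNat).map (fun y => pre y ++ List.replicate (gs.length * fs.toNat) pvT))
    = (List.range fs.toNat).map (fun y => pre y ++ gs.flatMap (fun g => pvBlk fs g y)) := by
  intro gs
  induction gs with
  | nil => intro j pre hpre; simp
  | cons g gs ih =>
      intro j pre hpre
      rw [PySem.List.enumerate_cons, List.foldl_cons]
      have hs : ((j : Int) + 1) = ((j + 1 : Nat) : Int) := by push_cast; ring
      rw [hs]
      have hstep := pvA_step fs j g pre gs.length hpre
      simp only [List.length_cons] at *
      rw [hstep]
      rw [ih (j + 1) (fun y => pre y ++ pvBlk fs g y)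
        (fun y => by simp [hpre, pvBlk_length]; ring)]
      apply List.map_congr_left
      intro y hy
      simp [List.append_assoc]

-- ===== VERDICT (by name: the statement is the Claim_ definition above) =====
theorem assemble_spritesheet_spec : Claim_equal_assemble_spritesheet := by
  intro grids fs _ _
  unfold Spec_assemble_spritesheet
  simp only [assemble_spritesheet, assemble_spritesheet_alt]
  congr 1
  have hinit : (List.range fs.toNat).map
      (fun _ => List.replicate (fs * (grids.length : Int)).toNat pvT)
      = (List.range fs.toNat).map
        (fun y => (fun _ => ([] : List (Int × Int × Int × Int))) y
          ++ List.replicate (grids.length * fs.toNat) pvT) := by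
    apply List.map_congr_left
    intro y _
    rw [List.nil_append, pv_width]
  rw [show (0 : Int) = ((0 : Nat) : Int) by simp, hinit,
    pvA_fold fs grids 0 (fun _ => []) (fun y => by simp)]
  apply List.map_congr_left
  intro y _
  have hbody : (fun (row : List (Int × Int × Int × Int)) grid =>
      if ((y : Nat) : Int) < ((grid.length : Nat) : Int) then
        (row ++ (List.range (min fs ((grid.headD []).length : Int)).toNat).map
          (fun x => (grid.getD y []).getD x pvT))
          ++ List.replicate (fs - min fs ((grid.headD []).length : Int)).toNat pvT
      else row ++ List.replicate fs.toNat pvT)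
      = fun row grid => row ++ pvBlk fs grid y := by
    funext row grid
    unfold pvBlk
    split_ifs with h
    · simp [List.append_assoc]
    · rfl
  rw [hbody, PySem.List.foldl_append_eq_flatMap, List.nil_append]
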